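-- pv_equiv track=rewrite | github.com/MrBrantCode/unitest_baseline | mut_generate/mist_train_cf/cf_52428/solution.py | second_smallest_and_sum_of_evens
-- ===== SOURCE A (Python) =====
-- def second_smallest_and_sum_of_evens(lst: list):
--     if not lst:
--         return None, 0
--
--     min1 = min2 = float('inf')
--     even_sum = 0
--
--     for x in lst:
--         if x % 2 == 0:
--             even_sum += x
--             if x < min1:
--                 min2 = min1
--                 min1 = x
--             elif x < min2 and x != min1:
--                 min2 = x
--
--     return min2 if min2 != float('inf') else None, even_sum
-- ===== SOURCE B (Python) =====
-- def second_smallest_and_sum_of_evens(lst: list):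
--     if not lst:
--         return None, 0
--     evens = [x for x in lst if x % 2 == 0]
--     d = sorted(set(evens))
--     return (d[1] if len(d) >= 2 else None), sum(evens)
-- ===== Notes on version B (the rewrite author's own statement) =====
-- stated objective: simpler
-- what changed: Replaces the single-pass min1/min2 state-machine with a filter-then-dedup-then-sort decomposition: the second smallest distinct even is the second element of sorted(set(evens)), the sum is sum(evens).
import Mathlib
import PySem

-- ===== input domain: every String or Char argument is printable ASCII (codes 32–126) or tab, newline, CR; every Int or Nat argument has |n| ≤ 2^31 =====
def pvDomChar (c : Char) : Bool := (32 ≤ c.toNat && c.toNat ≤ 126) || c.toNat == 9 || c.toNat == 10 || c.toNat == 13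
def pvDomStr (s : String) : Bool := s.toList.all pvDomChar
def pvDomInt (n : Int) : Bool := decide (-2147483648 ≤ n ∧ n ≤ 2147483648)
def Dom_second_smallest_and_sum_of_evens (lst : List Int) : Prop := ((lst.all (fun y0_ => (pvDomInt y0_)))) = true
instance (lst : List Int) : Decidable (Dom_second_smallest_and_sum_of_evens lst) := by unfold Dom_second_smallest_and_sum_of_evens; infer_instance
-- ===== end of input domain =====

-- B replaces A's single-pass min1/min2 tracking by filter + sorted(set(evens))[1]; objective: simpler.

-- ===== PORT A =====
-- min1/min2 hold float('inf') initially: modelled as Option Int, none = inf.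
def pvLtInf (x : Int) (m : Option Int) : Bool :=
  match m with
  | none => true          -- x < inf
  | some v => decide (x < v)

def pvEqInf (x : Int) (m : Option Int) : Bool :=
  match m with
  | none => false         -- x ≠ inf
  | some v => decide (x = v)

def pvStepA (st : Option Int × Option Int × Int) (x : Int) : Option Int × Option Int × Int :=
  if PySem.Int.mod x 2 = 0 then
    let s := st.2.2 + x
    if pvLtInf x st.1 then (some x, st.1, s)
    else if pvLtInf x st.2.1 && !pvEqInf x st.1 then (st.1, some x, s)
    else (st.1, st.2.1, s)
  else st

def second_smallest_and_sum_of_evens (lst : List Int) : Option Int × Int :=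
  if lst = [] then (none, 0)
  else
    let st := lst.foldl pvStepA (none, none, 0)
    (st.2.1, st.2.2)

-- ===== PORT B =====
def second_smallest_and_sum_of_evens_alt (lst : List Int) : Option Int × Int :=
  if lst = [] then (none, 0)
  else
    let evens := lst.filter (fun x => PySem.Int.mod x 2 = 0)
    let d := PySem.List.sorted (PySem.Set.ofList evens) (fun x => x) false
    ((if 2 ≤ PySem.List.len d then PySem.List.pyGet? d 1 else none), evens.sum)

-- ===== PRECONDITION & SPEC =====
def Spec_second_smallest_and_sum_of_evens (lst : List Int) (out : Option Int × Int) : Prop := out = second_smallest_and_sum_of_evens_alt lst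
instance (lst : List Int) (out : Option Int × Int) : Decidable (Spec_second_smallest_and_sum_of_evens lst out) := by unfold Spec_second_smallest_and_sum_of_evens; infer_instance

-- ===== CLAIM (what is proved, stated in full; the proofs are below) =====
def Claim_equal_second_smallest_and_sum_of_evens : Prop := ∀ (lst : List Int), Dom_second_smallest_and_sum_of_evens lst → Spec_second_smallest_and_sum_of_evens lst (second_smallest_and_sum_of_evens lst)

-- ===== LEMMAS AND PROOFS =====

-- sorted(set(E)): the strictly increasing enumeration of E's distinct elements
def pvSD (E : List Int) : List Int := PySem.List.sorted (PySem.Set.ofList E) (fun x => x) false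

theorem pvSD_pairwise (E : List Int) : (pvSD E).Pairwise (· < ·) := by
  have h := PySem.List.sorted_ofList_pairwise_lt (xs := E)
  simpa [pvSD] using h

theorem pvSD_mem (E : List Int) (x : Int) : x ∈ pvSD E ↔ x ∈ E := by
  simp [pvSD, PySem.List.mem_sorted, PySem.Set.mem_ofList]

theorem pvOfList_append_mem (E : List Int) (x : Int) (h : x ∈ E) :
    PySem.Set.ofList (E ++ [x]) = PySem.Set.ofList E := by
  rw [PySem.Set.ofList_eq_foldl, List.foldl_append, ← PySem.Set.ofList_eq_foldl]
  simp [PySem.Set.add, PySem.Set.contains, PySem.Set.mem_ofList, h]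

theorem pvOfList_append_not_mem (E : List Int) (x : Int) (h : x ∉ E) :
    PySem.Set.ofList (E ++ [x]) = PySem.Set.ofList E ++ [x] := by
  rw [PySem.Set.ofList_eq_foldl, List.foldl_append, ← PySem.Set.ofList_eq_foldl]
  simp [PySem.Set.add, PySem.Set.contains, PySem.Set.mem_ofList, h]

theorem pvOrderedInsert_pairwise (d : List Int) (x : Int) (hx : x ∉ d)
    (hd : d.Pairwise (· < ·)) :
    (List.orderedInsert (· ≤ ·) x d).Pairwise (· < ·) := by
  induction d with
  | nil => simp
  | cons b l ih =>
    have hxb : x ≠ b := by intro e; exact hx (e ▸ List.mem_cons_self ..)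
    have hxl : x ∉ l := fun m => hx (List.mem_cons_of_mem _ m)
    rcases List.pairwise_cons.mp hd with ⟨hb, hl⟩
    by_cases hle : x ≤ b
    · have hxb' : x < b := lt_of_le_of_ne hle hxb
      rw [List.orderedInsert, if_pos hle]
      exact List.pairwise_cons.mpr ⟨by
        intro y hy
        rcases List.mem_cons.mp hy with rfl | hy
        · exact hxb'
        · exact lt_trans hxb' (hb y hy), hd⟩
    · have hbx : b < x := lt_of_not_ge hle
      rw [List.orderedInsert, if_neg hle]
      refine List.pairwise_cons.mpr ⟨?_, ih hxl hl⟩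
      intro y hy
      have : y = x ∨ y ∈ l := by
        have := (List.perm_orderedInsert (· ≤ ·) x l).mem_iff.mp hy
        simpa [List.mem_cons] using this
      rcases this with rfl | hy
      · exact hbx
      · exact hb y hy

theorem pvSD_append_not_mem (E : List Int) (x : Int) (h : x ∉ E) :
    pvSD (E ++ [x]) = List.orderedInsert (· ≤ ·) x (pvSD E) := by
  have hx' : x ∉ pvSD E := fun m => h ((pvSD_mem E x).mp m)
  apply PySem.List.sorted_eq_of_perm_of_pairwise_lt
  · -- orderedInsert x (pvSD E) ~ ofList (E ++ [x])
    rw [pvOfList_append_not_mem E x h]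
    have h1 : (List.orderedInsert (· ≤ ·) x (pvSD E)).Perm (x :: pvSD E) :=
      List.perm_orderedInsert _ x _
    have h2 : (x :: pvSD E).Perm (x :: PySem.Set.ofList E) :=
      (PySem.List.sorted_perm (PySem.Set.ofList E) (fun x : Int => x) false).cons x
    have h3 : (x :: PySem.Set.ofList E).Perm (PySem.Set.ofList E ++ [x]) := by
      simpa using (List.perm_append_comm (l₁ := [x]) (l₂ := PySem.Set.ofList E))
    exact (h1.trans h2).trans h3
  · exact pvOrderedInsert_pairwise (pvSD E) x hx' (pvSD_pairwise E)

theorem pvSD_append_mem (E : List Int) (x : Int) (h : x ∈ E) :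
    pvSD (E ++ [x]) = pvSD E := by
  simp [pvSD, pvOfList_append_mem E x h]

theorem pvStep_even (E : List Int) (s x : Int) (hx : PySem.Int.mod x 2 = 0) :
    pvStepA ((pvSD E)[0]?, (pvSD E)[1]?, s) x
      = ((pvSD (E ++ [x]))[0]?, (pvSD (E ++ [x]))[1]?, s + x) := by
  by_cases hmem : x ∈ E
  · rw [pvSD_append_mem E x hmem]
    have hx' : x ∈ pvSD E := (pvSD_mem E x).mpr hmem
    have hp := pvSD_pairwise E
    unfold pvStepA
    rw [if_pos hx]
    cases hd : pvSD E with
    | nil => rw [hd] at hx'; simp at hx'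
    | cons a t =>
      rw [hd] at hx' hp
      rcases List.pairwise_cons.mp hp with ⟨ha, ht⟩
      rcases List.mem_cons.mp hx' with rfl | hxt
      · simp [pvLtInf, pvEqInf]
      · have hax : a < x := ha x hxt
        cases t with
        | nil => simp at hxt
        | cons b t' =>
          have hbx : b ≤ x := by
            rcases List.mem_cons.mp hxt with rfl | h2
            · exact le_refl x
            · exact le_of_lt ((List.pairwise_cons.mp ht).1 x h2)
          simp [pvLtInf, pvEqInf, not_lt.mpr (le_of_lt hax), not_lt.mpr hbx]
  · rw [pvSD_append_not_mem E x hmem]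
    have hx' : x ∉ pvSD E := fun m => hmem ((pvSD_mem E x).mp m)
    have hp := pvSD_pairwise E
    unfold pvStepA
    rw [if_pos hx]
    cases hd : pvSD E with
    | nil => simp [List.orderedInsert, pvLtInf]
    | cons a t =>
      rw [hd] at hx' hp
      have hxa : x ≠ a := fun e => hx' (e ▸ List.mem_cons_self ..)
      by_cases hla : x ≤ a
      · have hxa' : x < a := lt_of_le_of_ne hla hxa
        simp [List.orderedInsert, hla, pvLtInf, hxa']
      · have hax : a < x := lt_of_not_ge hla
        cases t with
        | nil =>
          simp [List.orderedInsert, hla, pvLtInf, pvEqInf,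
            not_lt.mpr (le_of_lt hax), hxa]
        | cons b t' =>
          have hxb : x ≠ b := fun e =>
            hx' (e ▸ List.mem_cons_of_mem a (List.mem_cons_self ..))
          by_cases hlb : x ≤ b
          · have hxb' : x < b := lt_of_le_of_ne hlb hxb
            simp [List.orderedInsert, hla, hlb, pvLtInf, pvEqInf,
              not_lt.mpr (le_of_lt hax), hxb', hxa]
          · have hbx : b < x := lt_of_not_ge hlb
            simp [List.orderedInsert, hla, hlb, pvLtInf, pvEqInf,
              not_lt.mpr (le_of_lt hax), not_lt.mpr (le_of_lt hbx)]

theorem pvStep_odd (st : Option Int × Option Int × Int) (x : Int)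
    (hx : ¬ PySem.Int.mod x 2 = 0) : pvStepA st x = st := by
  unfold pvStepA
  rw [if_neg hx]

theorem pvLoop (rest E : List Int) (s : Int) :
    rest.foldl pvStepA ((pvSD E)[0]?, (pvSD E)[1]?, s)
      = ((pvSD (E ++ rest.filter (fun x => PySem.Int.mod x 2 = 0)))[0]?,
         (pvSD (E ++ rest.filter (fun x => PySem.Int.mod x 2 = 0)))[1]?,
         s + (rest.filter (fun x => PySem.Int.mod x 2 = 0)).sum) := by
  induction rest generalizing E s with
  | nil => simp
  | cons x rest ih =>
    by_cases hx : PySem.Int.mod x 2 = 0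
    · have hstep := pvStep_even E s x hx
      simp only [List.foldl_cons, hstep, List.filter_cons, hx]
      have := ih (E ++ [x]) (s + x)
      simpa [List.append_assoc, add_assoc] using this
    · simp only [List.foldl_cons, pvStep_odd _ x hx, List.filter_cons, hx]
      simpa using ih E s

-- ===== VERDICT (by name: the statement is the Claim_ definition above) =====
theorem second_smallest_and_sum_of_evens_spec : Claim_equal_second_smallest_and_sum_of_evens := by
  intro lst _
  unfold Spec_second_smallest_and_sum_of_evens
  unfold second_smallest_and_sum_of_evens second_smallest_and_sum_of_evens_alt
  by_cases h : lst = []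
  · simp [h]
  · simp only [h, if_false]
    have h0 : ((pvSD [])[0]? : Option Int) = none := by decide
    have h1 : ((pvSD [])[1]? : Option Int) = none := by decide
    have hmain := pvLoop lst [] 0
    rw [h0, h1] at hmain
    rw [hmain]
    have hnil : ([] : List Int) ++ lst.filter (fun x => PySem.Int.mod x 2 = 0)
        = lst.filter (fun x => PySem.Int.mod x 2 = 0) := List.nil_append _
    rw [hnil]
    set evens := lst.filter (fun x => PySem.Int.mod x 2 = 0) with hev
    set d := PySem.List.sorted (PySem.Set.ofList evens) (fun x => x) false with hdd
    have hd : pvSD evens = d := rfl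
    rw [hd]
    refine Prod.ext ?_ (by simp)
    by_cases hlen : 2 ≤ d.length
    · have hg : PySem.List.pyGet? d 1 = d[(1:Int).toNat]? :=
        PySem.List.pyGet?_of_nonneg _ (by omega)
      simp [hg]
    · have hle : ¬ 2 ≤ PySem.List.len d := by
        rw [PySem.List.len_eq]; exact_mod_cast hlen
      rw [if_neg hle]
      simp [List.getElem?_eq_none (by omega : d.length ≤ 1)]
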